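-- pv_equiv track=rewrite | github.com/sonyaarom/huber_bot | utils/sitemap_processor.py | filter_sitemap_entries
-- ===== SOURCE A (Python) =====
-- def filter_sitemap_entries(entries, exclude_extensions=None, exclude_patterns=None, include_patterns=None):
--     filtered = entries
--     if exclude_extensions:
--         filtered = [entry for entry in filtered
--                     if not any(entry['url'].lower().endswith(ext.lower()) for ext in exclude_extensions)]
--     if exclude_patterns:
--         filtered = [entry for entry in filtered
--                     if not any(pattern in entry['url'] for pattern in exclude_patterns)]
--     if include_patterns:
--         filtered = [entry for entry in filtered
--                     if any(pattern in entry['url'] for pattern in include_patterns)]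
--     return filtered
-- ===== SOURCE B (Python) =====
-- def filter_sitemap_entries(entries, exclude_extensions=None, exclude_patterns=None, include_patterns=None):
--     def keep(entry):
--         if exclude_extensions and any(entry['url'].lower().endswith(ext.lower()) for ext in exclude_extensions):
--             return False
--         if exclude_patterns and any(pattern in entry['url'] for pattern in exclude_patterns):
--             return False
--         if include_patterns and not any(pattern in entry['url'] for pattern in include_patterns):
--             return False
--         return True
--     return [entry for entry in entries if keep(entry)]
-- ===== Notes on version B (the rewrite author's own statement) =====
-- stated objective: simpler
-- what changed: Three sequential list-comprehension passes building intermediate lists are fused into a single pass with one combined keep(url) predicate that checks all three clauses per entry.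
import Mathlib
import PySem

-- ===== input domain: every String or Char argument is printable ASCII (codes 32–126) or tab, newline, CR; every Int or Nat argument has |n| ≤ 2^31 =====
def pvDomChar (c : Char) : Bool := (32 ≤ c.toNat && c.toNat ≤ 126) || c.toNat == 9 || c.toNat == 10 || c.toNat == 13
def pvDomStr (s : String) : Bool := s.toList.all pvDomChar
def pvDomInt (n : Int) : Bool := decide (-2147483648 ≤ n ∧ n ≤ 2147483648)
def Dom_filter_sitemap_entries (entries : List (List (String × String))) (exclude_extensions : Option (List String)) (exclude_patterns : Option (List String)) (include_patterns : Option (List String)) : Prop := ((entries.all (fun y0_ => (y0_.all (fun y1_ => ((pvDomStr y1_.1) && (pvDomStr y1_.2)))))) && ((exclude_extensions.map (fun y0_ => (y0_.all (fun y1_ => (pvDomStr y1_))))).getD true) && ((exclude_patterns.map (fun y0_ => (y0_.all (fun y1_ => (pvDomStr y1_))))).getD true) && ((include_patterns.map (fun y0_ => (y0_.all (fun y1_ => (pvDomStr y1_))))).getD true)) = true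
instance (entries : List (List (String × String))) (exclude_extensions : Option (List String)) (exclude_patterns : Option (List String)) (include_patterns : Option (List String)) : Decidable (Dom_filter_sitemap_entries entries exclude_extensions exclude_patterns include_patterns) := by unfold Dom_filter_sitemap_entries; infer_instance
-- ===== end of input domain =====

-- ===== PORT A =====
-- B fuses A's three sequential filter passes into one pass with a combined predicate; same output.
-- entry['url']: first match in the association list (Python dict lookup); Pre_ guarantees it exists
-- whenever a lookup happens, so the port totalizes the lookup with getD "".
def pvUrl (e : List (String × String)) : String :=
  ((e.find? (fun p => p.1 == "url")).map (·.2)).getD ""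

-- 'if xs:' truthiness of an Optional[list]
def pvTruthy (o : Option (List String)) : Bool :=
  !(o.getD []).isEmpty

def pvExtHit (e : List (String × String)) (exts : List String) : Bool :=
  exts.any (fun ext => PySem.Str.endswith (PySem.Str.lower (pvUrl e)) (PySem.Str.lower ext))

def pvPatHit (e : List (String × String)) (pats : List String) : Bool :=
  pats.any (fun pat => PySem.Str.isIn pat (pvUrl e))

def filter_sitemap_entries (entries : List (List (String × String))) (exclude_extensions : Option (List String)) (exclude_patterns : Option (List String)) (include_patterns : Option (List String)) : List (List (String × String)) :=
  let filtered := entries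
  let filtered := if pvTruthy exclude_extensions then
      filtered.filter (fun e => !(pvExtHit e (exclude_extensions.getD []))) else filtered
  let filtered := if pvTruthy exclude_patterns then
      filtered.filter (fun e => !(pvPatHit e (exclude_patterns.getD []))) else filtered
  let filtered := if pvTruthy include_patterns then
      filtered.filter (fun e => pvPatHit e (include_patterns.getD [])) else filtered
  filtered

-- ===== PORT B =====
def pvKeep (exclude_extensions : Option (List String)) (exclude_patterns : Option (List String)) (include_patterns : Option (List String)) (e : List (String × String)) : Bool :=
  if pvTruthy exclude_extensions && pvExtHit e (exclude_extensions.getD []) then false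
  else if pvTruthy exclude_patterns && pvPatHit e (exclude_patterns.getD []) then false
  else if pvTruthy include_patterns && !(pvPatHit e (include_patterns.getD [])) then false
  else true

def filter_sitemap_entries_alt (entries : List (List (String × String))) (exclude_extensions : Option (List String)) (exclude_patterns : Option (List String)) (include_patterns : Option (List String)) : List (List (String × String)) :=
  entries.filter (pvKeep exclude_extensions exclude_patterns include_patterns)

-- ===== PRECONDITION & SPEC =====
-- Pre_ excludes exactly the inputs where Python A raises KeyError: some filter list is truthy
-- (non-None, non-empty) yet some entry lacks a 'url' key.
def Pre_filter_sitemap_entries (entries : List (List (String × String))) (exclude_extensions : Option (List String)) (exclude_patterns : Option (List String)) (include_patterns : Option (List String)) : Prop :=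
  ((!(pvTruthy exclude_extensions || pvTruthy exclude_patterns || pvTruthy include_patterns))
    || entries.all (fun e => (e.find? (fun p => p.1 == "url")).isSome)) = true
instance (entries : List (List (String × String))) (exclude_extensions : Option (List String)) (exclude_patterns : Option (List String)) (include_patterns : Option (List String)) : Decidable (Pre_filter_sitemap_entries entries exclude_extensions exclude_patterns include_patterns) := by unfold Pre_filter_sitemap_entries; infer_instance

def pvWitness_filter_sitemap_entries : (List (List (String × String))) × Option (List String) × Option (List String) × Option (List String) :=
  ([[("url", "http://x/a.pdf")], [("url", "http://x/docs/b.html"), ("lastmod", "2020")]],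
   some [".pdf"], some ["tmp"], some ["docs", "x"])

def Spec_filter_sitemap_entries (entries : List (List (String × String))) (exclude_extensions : Option (List String)) (exclude_patterns : Option (List String)) (include_patterns : Option (List String)) (out : List (List (String × String))) : Prop := out = filter_sitemap_entries_alt entries exclude_extensions exclude_patterns include_patterns
instance (entries : List (List (String × String))) (exclude_extensions : Option (List String)) (exclude_patterns : Option (List String)) (include_patterns : Option (List String)) (out : List (List (String × String))) : Decidable (Spec_filter_sitemap_entries entries exclude_extensions exclude_patterns include_patterns out) := by unfold Spec_filter_sitemap_entries; infer_instance

-- ===== CLAIM (what is proved, stated in full; the proofs are below) =====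
def Claim_equal_filter_sitemap_entries : Prop := ∀ (entries : List (List (String × String))) (exclude_extensions : Option (List String)) (exclude_patterns : Option (List String)) (include_patterns : Option (List String)), Dom_filter_sitemap_entries entries exclude_extensions exclude_patterns include_patterns → Pre_filter_sitemap_entries entries exclude_extensions exclude_patterns include_patterns → Spec_filter_sitemap_entries entries exclude_extensions exclude_patterns include_patterns (filter_sitemap_entries entries exclude_extensions exclude_patterns include_patterns)

-- ===== LEMMAS AND PROOFS =====

-- a guarded filter pass equals an unconditional filter with the guard folded into the predicate
lemma guarded_filter_eq (t : Bool) (p : List (String × String) → Bool)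
    (l : List (List (String × String))) :
    (if t then l.filter p else l) = l.filter (fun e => !(t && !(p e))) := by
  cases t <;> simp

lemma keep_eq (ee ep ip : Option (List String)) (e : List (String × String)) :
    pvKeep ee ep ip e =
      (!(pvTruthy ee && pvExtHit e (ee.getD [])) &&
       (!(pvTruthy ep && pvPatHit e (ep.getD [])) &&
        !(pvTruthy ip && !(pvPatHit e (ip.getD []))))) := by
  unfold pvKeep
  cases h1 : pvTruthy ee && pvExtHit e (ee.getD []) <;>
    cases h2 : pvTruthy ep && pvPatHit e (ep.getD []) <;>
      cases h3 : pvTruthy ip && !(pvPatHit e (ip.getD [])) <;> simp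

-- ===== VERDICT (by name: the statement is the Claim_ definition above) =====
theorem filter_sitemap_entries_spec : Claim_equal_filter_sitemap_entries := by
  intro entries ee ep ip _ _
  unfold Spec_filter_sitemap_entries filter_sitemap_entries filter_sitemap_entries_alt
  simp only [guarded_filter_eq]
  simp only [List.filter_filter]
  apply List.filter_congr
  intro e _
  rw [keep_eq]
  cases pvExtHit e (ee.getD []) <;> cases pvPatHit e (ep.getD []) <;> cases pvPatHit e (ip.getD []) <;>
    cases pvTruthy ee <;> cases pvTruthy ep <;> cases pvTruthy ip <;> rfl
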